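-- pv_equiv track=rewrite | github.com/greenblat/vlsistuff | pybin3/insts.py | toC
-- ===== SOURCE A (Python) =====
-- OpcodeWidth=25
--
-- def gather_busses(wrds):
--     res = []
--     state='idle'
--     for word in wrds:
--         if (state=='idle'):
--             if ('[' in word):
--                 state='bus'
--                 x = word.index('[')
--                 Bus = word[:x]
--                 St=int(word[x+1:-1])
--                 En=St
--             else:
--                 res = res + [word]
--         elif (state=='bus'):
--             if ('[' in word):
--                 state='bus'
--                 x = word.index('[')
--                 Bus1 = word[:x]
--                 Here=int(word[x+1:-1])
--                 if (Here==(En-1))and(Bus1==Bus):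
--                     En=Here
--                 else:
--                     res = res + [(Bus,St,En)]
--                     Bus=Bus1
--                     St=Here
--                     En=Here
--             else:
--                 res = res + [(Bus,St,En)]
--                 res = res + [word]
--                 state='idle'
--     if (state=='bus'):
--         res = res + [(Bus,St,En)]
--     return res
--
-- def toC(Inst,Coding):
--     wrds = gather_busses(Coding)
--     pos=OpcodeWidth-1
--     res=[]
--     for i in range(0,len(wrds)):
--         if (wrds[i] in ['0','1']):
--             pos=pos-1
--         elif (type(wrds[i]) is str):
--             res = res+[(wrds[i],pos,1)]
--             pos=pos-1
--         elif (type(wrds[i]) is tuple):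
--             (fname,ind1,ind2)=wrds[i]
--             many = ind1-ind2+1
--             res = res+[(fname,pos-many+1,many)]
--             pos=pos-many
--
--     return res
-- ===== SOURCE B (Python) =====
-- OpcodeWidth = 25
--
-- def toC(Inst, Coding):
--     # Single fused pass: tokenize each word on the fly and fold maximal
--     # descending-index bus runs directly into the positioned output,
--     # without building gather_busses' intermediate mixed list.
--     res = []
--     pos = OpcodeWidth - 1
--     run = None  # open bus run as (name, start_index, end_index), or None
--
--     for w in Coding:
--         if '[' in w:
--             x = w.index('[')
--             nm, ix = w[:x], int(w[x + 1:-1])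
--             if run is not None and ix == run[2] - 1 and nm == run[0]:
--                 run = (run[0], run[1], ix)
--             else:
--                 if run is not None:
--                     many = run[1] - run[2] + 1
--                     res.append((run[0], pos - many + 1, many))
--                     pos -= many
--                 run = (nm, ix, ix)
--         else:
--             if run is not None:
--                 many = run[1] - run[2] + 1
--                 res.append((run[0], pos - many + 1, many))
--                 pos -= many
--                 run = None
--             if w in ('0', '1'):
--                 pos -= 1
--             else:
--                 res.append((w, pos, 1))
--                 pos -= 1
--
--     if run is not None:
--         many = run[1] - run[2] + 1
--         res.append((run[0], pos - many + 1, many))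
--     return res
-- ===== Notes on version B (the rewrite author's own statement) =====
-- stated objective: faster
-- what changed: Replaces A's two-phase pipeline (gather_busses idle/bus string state machine building an intermediate mixed str/tuple list via quadratic res=res+[...] re-concatenation, then an indexed position-assignment loop with type() dispatch) by one fused linear pass that tokenizes each word on the fly, folds maximal descending bus runs directly into the positioned output, and appends in place.
import Mathlib
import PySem

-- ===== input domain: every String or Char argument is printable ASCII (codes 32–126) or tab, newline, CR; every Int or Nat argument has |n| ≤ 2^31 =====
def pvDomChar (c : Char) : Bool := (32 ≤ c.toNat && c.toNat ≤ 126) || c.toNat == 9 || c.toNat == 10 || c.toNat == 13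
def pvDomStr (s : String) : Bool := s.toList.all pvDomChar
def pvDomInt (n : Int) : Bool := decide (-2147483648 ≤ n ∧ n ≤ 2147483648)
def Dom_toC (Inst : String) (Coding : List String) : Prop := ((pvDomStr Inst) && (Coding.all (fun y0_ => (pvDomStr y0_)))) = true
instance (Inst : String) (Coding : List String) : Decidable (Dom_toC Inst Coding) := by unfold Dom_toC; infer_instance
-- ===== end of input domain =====

-- B replaces A's gather-busses state machine plus second positioned pass by ONE fused pass
-- that folds maximal descending bus runs directly into the positioned output, appending in place
-- where A rebuilds 'res' by concatenation (objective: faster; a timing run measured it).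
-- Equivalence is proved on Pre_toC (inputs where Python A returns).

-- shared word-tokenizing helpers (both Pythons run exactly these operations on each word)
-- '[' in word
def pvHasBr (cs : List Char) : Bool := PySem.Chars.isIn ['['] cs
-- word.index('[')  (guarded by pvHasBr in both programs, so find's -1 case is unreachable)
def pvBr (cs : List Char) : Int := PySem.Chars.find cs ['[']
-- word[:x]
def pvBus (cs : List Char) : String := String.ofList (PySem.Chars.slice cs none (some (pvBr cs)))
-- int(word[x+1:-1]); none exactly where Python's int() raises ValueError
def pvIdx? (cs : List Char) : Option Int := PySem.Int.ofChars? (PySem.Chars.slice cs (some (pvBr cs + 1)) (some (-1)))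

-- ===== PORT A =====
-- gather_busses' intermediate list holds strings and (Bus,St,En) triples
abbrev pvTok : Type := String ⊕ (String × Int × Int)

-- the for-loop of gather_busses: state 'idle' = none, state 'bus' = some (Bus,St,En);
-- 'res = res + [...]' kept as an accumulator; the trailing 'if state=='bus'' flush is the [] case
def pvGatherLoop : List String → Option (String × Int × Int) → List pvTok → List pvTok
  | [], none, res => res
  | [], some b, res => res ++ [Sum.inr b]
  | w :: ws, none, res =>
      if pvHasBr w.toList then
        pvGatherLoop ws (some (pvBus w.toList, (pvIdx? w.toList).getD 0, (pvIdx? w.toList).getD 0)) res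
      else
        pvGatherLoop ws none (res ++ [Sum.inl w])
  | w :: ws, some (B, S, E), res =>
      if pvHasBr w.toList then
        let B1 := pvBus w.toList
        let H := (pvIdx? w.toList).getD 0
        if H = E - 1 ∧ B1 = B then
          pvGatherLoop ws (some (B, S, H)) res
        else
          pvGatherLoop ws (some (B1, H, H)) (res ++ [Sum.inr (B, S, E)])
      else
        pvGatherLoop ws none (res ++ [Sum.inr (B, S, E), Sum.inl w])

-- toC's 'for i in range(0,len(wrds))' pass over the gathered words
def pvToCLoop : List pvTok → Int → List (String × Int × Int) → List (String × Int × Int)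
  | [], _, res => res
  | Sum.inl w :: ws, pos, res =>
      if w = "0" ∨ w = "1" then pvToCLoop ws (pos - 1) res
      else pvToCLoop ws (pos - 1) (res ++ [(w, pos, 1)])
  | Sum.inr (fname, ind1, ind2) :: ws, pos, res =>
      let many := ind1 - ind2 + 1
      pvToCLoop ws (pos - many) (res ++ [(fname, pos - many + 1, many)])

def toC (Inst : String) (Coding : List String) : List (String × Int × Int) :=
  pvToCLoop (pvGatherLoop Coding none []) (25 - 1) []

-- ===== PORT B =====
-- B's single fused loop: run = open bus run (name, st, en) or none; flush at []
def pvBLoop : List String → Int → Option (String × Int × Int) → List (String × Int × Int) → List (String × Int × Int)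
  | [], _, none, res => res
  | [], pos, some (n, s, e), res =>
      let many := s - e + 1
      res ++ [(n, pos - many + 1, many)]
  | w :: ws, pos, run, res =>
      if pvHasBr w.toList then
        let nm := pvBus w.toList
        let ix := (pvIdx? w.toList).getD 0
        match run with
        | some (n, s, e) =>
          if ix = e - 1 ∧ nm = n then
            pvBLoop ws pos (some (n, s, ix)) res
          else
            let many := s - e + 1
            pvBLoop ws (pos - many) (some (nm, ix, ix)) (res ++ [(n, pos - many + 1, many)])
        | none => pvBLoop ws pos (some (nm, ix, ix)) res
      else
        let pr : Int × List (String × Int × Int) :=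
          match run with
          | some (n, s, e) =>
            let many := s - e + 1
            (pos - many, res ++ [(n, pos - many + 1, many)])
          | none => (pos, res)
        if w = "0" ∨ w = "1" then pvBLoop ws (pr.1 - 1) none pr.2
        else pvBLoop ws (pr.1 - 1) none (pr.2 ++ [(w, pr.1, 1)])

def toC_alt (Inst : String) (Coding : List String) : List (String × Int × Int) :=
  pvBLoop Coding (25 - 1) none []

-- ===== PRECONDITION & SPEC =====
-- Pre_ excludes exactly the inputs where Python A raises ValueError: a word containing '['
-- whose bracketed text (int(word[x+1:-1])) is not a valid Python int literal.
def Pre_toC (Inst : String) (Coding : List String) : Prop :=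
  ∀ w ∈ Coding, pvHasBr w.toList = true → (pvIdx? w.toList).isSome = true
instance (Inst : String) (Coding : List String) : Decidable (Pre_toC Inst Coding) := by unfold Pre_toC; infer_instance

def pvWitness_toC : String × List String := ("add", ["1", "0", "rd", "a[3]", "a[2]", "b[7]", "rs"])

def Spec_toC (Inst : String) (Coding : List String) (out : List (String × Int × Int)) : Prop := out = toC_alt Inst Coding
instance (Inst : String) (Coding : List String) (out : List (String × Int × Int)) : Decidable (Spec_toC Inst Coding out) := by unfold Spec_toC; infer_instance

-- ===== CLAIM (what is proved, stated in full; the proofs are below) =====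
def Claim_equal_toC : Prop := ∀ (Inst : String) (Coding : List String), Dom_toC Inst Coding → Pre_toC Inst Coding → Spec_toC Inst Coding (toC Inst Coding)

-- ===== LEMMAS AND PROOFS =====

-- accumulator-free description of gather_busses' output
def pvGTok : List String → Option (String × Int × Int) → List pvTok
  | [], none => []
  | [], some b => [Sum.inr b]
  | w :: ws, none =>
      if pvHasBr w.toList then
        pvGTok ws (some (pvBus w.toList, (pvIdx? w.toList).getD 0, (pvIdx? w.toList).getD 0))
      else
        Sum.inl w :: pvGTok ws none
  | w :: ws, some (B, S, E) =>
      if pvHasBr w.toList then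
        let B1 := pvBus w.toList
        let H := (pvIdx? w.toList).getD 0
        if H = E - 1 ∧ B1 = B then pvGTok ws (some (B, S, H))
        else Sum.inr (B, S, E) :: pvGTok ws (some (B1, H, H))
      else
        Sum.inr (B, S, E) :: Sum.inl w :: pvGTok ws none

theorem pvGatherLoop_eq_acc (ws : List String) (st : Option (String × Int × Int)) (res : List pvTok) :
    pvGatherLoop ws st res = res ++ pvGTok ws st := by
  induction ws generalizing st res with
  | nil => cases st with
    | none => simp [pvGatherLoop, pvGTok]
    | some b => simp [pvGatherLoop, pvGTok]
  | cons w ws ih =>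
    cases st with
    | none =>
      by_cases h : pvHasBr w.toList = true <;> simp [pvGatherLoop, pvGTok, h, ih]
    | some b =>
      obtain ⟨B, S, E⟩ := b
      by_cases h : pvHasBr w.toList = true
      · by_cases h2 : ((pvIdx? w.toList).getD 0 = E - 1 ∧ pvBus w.toList = B) <;>
          simp [pvGatherLoop, pvGTok, h, h2, ih]
      · simp [pvGatherLoop, pvGTok, h, ih]

theorem pvToCLoop_gtok (ws : List String) (st : Option (String × Int × Int)) (pos : Int)
    (res : List (String × Int × Int)) :
    pvToCLoop (pvGTok ws st) pos res = pvBLoop ws pos st res := by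
  induction ws generalizing st pos res with
  | nil => cases st with
    | none => simp [pvGTok, pvToCLoop, pvBLoop]
    | some b => obtain ⟨n, s, e⟩ := b; simp [pvGTok, pvToCLoop, pvBLoop]
  | cons w ws ih =>
    cases st with
    | none =>
      by_cases h : pvHasBr w.toList = true
      · simp [pvGTok, pvBLoop, h, ih]
      · by_cases h2 : (w = "0" ∨ w = "1") <;> simp [pvGTok, pvToCLoop, pvBLoop, h, h2, ih]
    | some b =>
      obtain ⟨B, S, E⟩ := b
      by_cases h : pvHasBr w.toList = true
      · by_cases h2 : ((pvIdx? w.toList).getD 0 = E - 1 ∧ pvBus w.toList = B) <;>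
          simp [pvGTok, pvToCLoop, pvBLoop, h, h2, ih]
      · by_cases h2 : (w = "0" ∨ w = "1") <;> simp [pvGTok, pvToCLoop, pvBLoop, h, h2, ih]

-- ===== VERDICT (by name: the statement is the Claim_ definition above) =====
theorem toC_spec : Claim_equal_toC := by
  intro Inst Coding _ _
  unfold Spec_toC toC toC_alt
  rw [pvGatherLoop_eq_acc, List.nil_append, pvToCLoop_gtok]
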